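-- pv_equiv track=rewrite | github.com/juanraunak/spectre_v3 | atlas_6.py | _fallback_dynamic_clusters
-- ===== SOURCE A (Python) =====
-- from typing import Any, Dict, List, Optional
--
-- def _fallback_dynamic_clusters(all_skills: List[str], career_domain: str) -> Dict[str, Any]:
--     keyword_buckets = {
--         "Technical Foundations":       {"kw": ["python", "java", "sql", "javascript", "typescript",
--             "c++", "go", "rust", "html", "css", "react", "node", "api", "git", "docker",
--             "kubernetes", "aws", "azure", "gcp", "linux", "database", "system design",
--             "architecture", "microservices", "ci/cd", "testing", "debugging", "algorithms"]},
--         "Data & Analytics":            {"kw": ["data", "analytics", "machine learning", "ai",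
--             "deep learning", "nlp", "statistics", "tableau", "power bi", "excel", "etl",
--             "pipeline", "tensorflow", "pytorch", "modeling", "visualization"]},
--         "Product & Innovation":        {"kw": ["product", "roadmap", "user research", "a/b testing",
--             "mvp", "feature", "backlog", "sprint", "agile", "scrum", "kanban", "jira",
--             "discovery", "prototype", "wireframe", "design thinking"]},
--         "Sales & Revenue":             {"kw": ["sales", "revenue", "pipeline", "quota", "crm",
--             "salesforce", "hubspot", "account management", "client", "customer", "negotiation",
--             "closing", "prospecting"]},
--         "Marketing & Growth":          {"kw": ["marketing", "brand", "seo", "sem", "content",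
--             "social media", "campaign", "demand gen", "lead gen", "growth", "conversion",
--             "funnel", "acquisition", "retention"]},
--         "Strategy & Business":         {"kw": ["strategy", "strategic", "business development",
--             "partnership", "market", "competitive", "go-to-market", "gtm", "expansion",
--             "p&l", "business model", "stakeholder"]},
--         "Leadership & Management":     {"kw": ["leadership", "management", "team", "mentoring",
--             "coaching", "hiring", "performance", "culture", "cross-functional", "executive",
--             "board", "decision", "influence", "delegation", "vision"]},
--         "Finance & Operations":        {"kw": ["finance", "budget", "forecast", "accounting",
--             "audit", "compliance", "operations", "logistics", "supply chain", "procurement",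
--             "inventory", "process", "lean", "six sigma", "cost"]},
--         "Communication & Soft Skills": {"kw": ["communication", "presentation", "writing",
--             "public speaking", "collaboration", "empathy", "adaptability", "time management",
--             "problem solving", "critical thinking", "interpersonal", "conflict resolution"]},
--     }
--
--     clusters: Dict[str, Dict[str, Any]] = {}
--     assigned_skills: set = set()
--     for cluster_name, bucket in keyword_buckets.items():
--         matched = []
--         for skill in all_skills:
--             if skill.lower() in assigned_skills:
--                 continue
--             if any(kw in skill.lower() for kw in bucket["kw"]):
--                 matched.append(skill)
--                 assigned_skills.add(skill.lower())
--         if matched: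
--             clusters[cluster_name] = {"skills": sorted(matched)}
--
--     remaining = [s for s in all_skills if s.lower() not in assigned_skills]
--     if remaining:
--         clusters["Other Skills"] = {"skills": sorted(remaining)}
--     return {"clusters": clusters}
-- ===== SOURCE B (Python) =====
-- # B: single pass over all_skills (skill-outer instead of bucket-outer); each skill is
-- # routed to its first matching bucket once, using a seen-set of lowercased matched skills.
-- from typing import Any, Dict, List
--
-- _KEYWORD_BUCKETS = [
--     ("Technical Foundations", ["python", "java", "sql", "javascript", "typescript",
--         "c++", "go", "rust", "html", "css", "react", "node", "api", "git", "docker",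
--         "kubernetes", "aws", "azure", "gcp", "linux", "database", "system design",
--         "architecture", "microservices", "ci/cd", "testing", "debugging", "algorithms"]),
--     ("Data & Analytics", ["data", "analytics", "machine learning", "ai",
--         "deep learning", "nlp", "statistics", "tableau", "power bi", "excel", "etl",
--         "pipeline", "tensorflow", "pytorch", "modeling", "visualization"]),
--     ("Product & Innovation", ["product", "roadmap", "user research", "a/b testing",
--         "mvp", "feature", "backlog", "sprint", "agile", "scrum", "kanban", "jira",
--         "discovery", "prototype", "wireframe", "design thinking"]),
--     ("Sales & Revenue", ["sales", "revenue", "pipeline", "quota", "crm",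
--         "salesforce", "hubspot", "account management", "client", "customer", "negotiation",
--         "closing", "prospecting"]),
--     ("Marketing & Growth", ["marketing", "brand", "seo", "sem", "content",
--         "social media", "campaign", "demand gen", "lead gen", "growth", "conversion",
--         "funnel", "acquisition", "retention"]),
--     ("Strategy & Business", ["strategy", "strategic", "business development",
--         "partnership", "market", "competitive", "go-to-market", "gtm", "expansion",
--         "p&l", "business model", "stakeholder"]),
--     ("Leadership & Management", ["leadership", "management", "team", "mentoring",
--         "coaching", "hiring", "performance", "culture", "cross-functional", "executive",
--         "board", "decision", "influence", "delegation", "vision"]),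
--     ("Finance & Operations", ["finance", "budget", "forecast", "accounting",
--         "audit", "compliance", "operations", "logistics", "supply chain", "procurement",
--         "inventory", "process", "lean", "six sigma", "cost"]),
--     ("Communication & Soft Skills", ["communication", "presentation", "writing",
--         "public speaking", "collaboration", "empathy", "adaptability", "time management",
--         "problem solving", "critical thinking", "interpersonal", "conflict resolution"]),
-- ]
--
-- def _fallback_dynamic_clusters(all_skills: List[str], career_domain: str) -> Dict[str, Any]:
--     matches: Dict[str, List[str]] = {name: [] for name, _ in _KEYWORD_BUCKETS}
--     seen: set = set()
--     remaining: List[str] = []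
--     for skill in all_skills:
--         low = skill.lower()
--         if low in seen:
--             continue
--         target = next((name for name, kws in _KEYWORD_BUCKETS
--                        if any(kw in low for kw in kws)), None)
--         if target is None:
--             remaining.append(skill)
--         else:
--             matches[target].append(skill)
--             seen.add(low)
--     clusters: Dict[str, Any] = {name: {"skills": sorted(matches[name])}
--                                 for name, _ in _KEYWORD_BUCKETS if matches[name]}
--     if remaining:
--         clusters["Other Skills"] = {"skills": sorted(remaining)}
--     return {"clusters": clusters}
-- ===== Notes on version B (the rewrite author's own statement) =====
-- stated objective: alternative
-- what changed: A iterates buckets in the outer loop and rescans the whole skill list once per bucket while threading a global assigned-set; B makes a single pass over the skills, routing each skill to its first matching bucket (with a seen-set of lowercased matched skills) and building the per-bucket lists and the remaining list in that one pass, then emits the non-empty clusters in bucket order.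
import Mathlib
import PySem

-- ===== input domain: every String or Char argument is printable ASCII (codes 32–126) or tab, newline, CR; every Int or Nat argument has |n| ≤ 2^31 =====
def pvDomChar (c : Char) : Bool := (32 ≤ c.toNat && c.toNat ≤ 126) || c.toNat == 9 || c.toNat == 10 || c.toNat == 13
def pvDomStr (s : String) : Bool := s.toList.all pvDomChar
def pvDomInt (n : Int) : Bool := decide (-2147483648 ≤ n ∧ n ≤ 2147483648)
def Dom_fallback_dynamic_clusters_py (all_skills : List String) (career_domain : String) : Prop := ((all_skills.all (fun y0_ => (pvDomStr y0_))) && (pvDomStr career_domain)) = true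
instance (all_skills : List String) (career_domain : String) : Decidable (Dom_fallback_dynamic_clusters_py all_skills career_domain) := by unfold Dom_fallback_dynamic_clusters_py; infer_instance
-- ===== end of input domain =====

-- B replaces A's bucket-outer/skill-inner double loop (each bucket rescans all_skills) by a
-- single pass over all_skills that routes each skill to its first matching bucket (objective:
-- alternative decomposition, same result).

-- Shared table: keyword_buckets as an (insertion-ordered) association list; each bucket's
-- {"kw": [...]} one-key dict is represented by its keyword list.
def keywordBuckets : List (String × List String) := [
  ("Technical Foundations", ["python", "java", "sql", "javascript", "typescript",
      "c++", "go", "rust", "html", "css", "react", "node", "api", "git", "docker",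
      "kubernetes", "aws", "azure", "gcp", "linux", "database", "system design",
      "architecture", "microservices", "ci/cd", "testing", "debugging", "algorithms"]),
  ("Data & Analytics", ["data", "analytics", "machine learning", "ai",
      "deep learning", "nlp", "statistics", "tableau", "power bi", "excel", "etl",
      "pipeline", "tensorflow", "pytorch", "modeling", "visualization"]),
  ("Product & Innovation", ["product", "roadmap", "user research", "a/b testing",
      "mvp", "feature", "backlog", "sprint", "agile", "scrum", "kanban", "jira",
      "discovery", "prototype", "wireframe", "design thinking"]),
  ("Sales & Revenue", ["sales", "revenue", "pipeline", "quota", "crm",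
      "salesforce", "hubspot", "account management", "client", "customer", "negotiation",
      "closing", "prospecting"]),
  ("Marketing & Growth", ["marketing", "brand", "seo", "sem", "content",
      "social media", "campaign", "demand gen", "lead gen", "growth", "conversion",
      "funnel", "acquisition", "retention"]),
  ("Strategy & Business", ["strategy", "strategic", "business development",
      "partnership", "market", "competitive", "go-to-market", "gtm", "expansion",
      "p&l", "business model", "stakeholder"]),
  ("Leadership & Management", ["leadership", "management", "team", "mentoring",
      "coaching", "hiring", "performance", "culture", "cross-functional", "executive",
      "board", "decision", "influence", "delegation", "vision"]),
  ("Finance & Operations", ["finance", "budget", "forecast", "accounting",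
      "audit", "compliance", "operations", "logistics", "supply chain", "procurement",
      "inventory", "process", "lean", "six sigma", "cost"]),
  ("Communication & Soft Skills", ["communication", "presentation", "writing",
      "public speaking", "collaboration", "empathy", "adaptability", "time management",
      "problem solving", "critical thinking", "interpersonal", "conflict resolution"])]

-- 'any(kw in low for kw in kws)' (both Pythons contain this subexpression)
def kwMatch (kws : List String) (low : String) : Bool := kws.any (fun kw => PySem.Str.isIn kw low)

-- ===== PORT A =====
-- A's outer-loop body: inner pass over all_skills collecting `matched` while growing `assigned`,
-- then 'if matched: clusters[cluster_name] = {"skills": sorted(matched)}'.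
def aStep (all_skills : List String)
    (st : PySem.Dict String (List (String × List String)) × PySem.Set String)
    (bucket : String × List String) :
    PySem.Dict String (List (String × List String)) × PySem.Set String :=
  let inner := all_skills.foldl (fun (acc : List String × PySem.Set String) skill =>
      if PySem.Set.contains acc.2 (PySem.Str.lower skill) then acc
      else if kwMatch bucket.2 (PySem.Str.lower skill) then
        (acc.1 ++ [skill], PySem.Set.add acc.2 (PySem.Str.lower skill))
      else acc) ([], st.2)
  (if inner.1 = [] then st.1
   else st.1.insert bucket.1 [("skills", PySem.List.sorted inner.1 (fun x => x) false)],
   inner.2)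

def fallback_dynamic_clusters_py (all_skills : List String) (career_domain : String) :
    List (String × List (String × List (String × List String))) :=
  let st := keywordBuckets.foldl (aStep all_skills) (PySem.Dict.empty, PySem.Set.empty)
  let remaining := all_skills.filter (fun s => !(PySem.Set.contains st.2 (PySem.Str.lower s)))
  let clusters := if remaining = [] then st.1
    else st.1.insert "Other Skills" [("skills", PySem.List.sorted remaining (fun x => x) false)]
  [("clusters", clusters.items)]

-- ===== PORT B =====
-- 'next((name for name, kws in _KEYWORD_BUCKETS if any(kw in low for kw in kws)), None)'
def bRoute (low : String) : Option String :=
  (keywordBuckets.find? (fun b => kwMatch b.2 low)).map Prod.fst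

-- B's single-pass loop body over skills
def bStep (st : PySem.Dict String (List String) × PySem.Set String × List String)
    (skill : String) : PySem.Dict String (List String) × PySem.Set String × List String :=
  let low := PySem.Str.lower skill
  if PySem.Set.contains st.2.1 low then st
  else match bRoute low with
    | none => (st.1, st.2.1, st.2.2 ++ [skill])
    | some name => (st.1.modify name [] (fun xs => xs ++ [skill]), PySem.Set.add st.2.1 low, st.2.2)

def fallback_dynamic_clusters_py_alt (all_skills : List String) (career_domain : String) :
    List (String × List (String × List (String × List String))) :=
  let init := keywordBuckets.foldl
    (fun (d : PySem.Dict String (List String)) b => d.insert b.1 ([] : List String))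
    PySem.Dict.empty
  let st := all_skills.foldl bStep (init, PySem.Set.empty, [])
  let clusters := keywordBuckets.foldl
    (fun (c : PySem.Dict String (List (String × List String))) b =>
      if st.1.getD b.1 [] = [] then c
      else c.insert b.1 [("skills", PySem.List.sorted (st.1.getD b.1 []) (fun x => x) false)])
    PySem.Dict.empty
  let clusters := if st.2.2 = [] then clusters
    else clusters.insert "Other Skills" [("skills", PySem.List.sorted st.2.2 (fun x => x) false)]
  [("clusters", clusters.items)]

-- ===== PRECONDITION & SPEC =====
def Spec_fallback_dynamic_clusters_py (all_skills : List String) (career_domain : String) (out : List (String × List (String × List (String × List String)))) : Prop := out = fallback_dynamic_clusters_py_alt all_skills career_domain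
instance (all_skills : List String) (career_domain : String) (out : List (String × List (String × List (String × List String)))) : Decidable (Spec_fallback_dynamic_clusters_py all_skills career_domain out) := by unfold Spec_fallback_dynamic_clusters_py; infer_instance

-- ===== CLAIM (what is proved, stated in full; the proofs are below) =====
def Claim_equal_fallback_dynamic_clusters_py : Prop := ∀ (all_skills : List String) (career_domain : String), Dom_fallback_dynamic_clusters_py all_skills career_domain → Spec_fallback_dynamic_clusters_py all_skills career_domain (fallback_dynamic_clusters_py all_skills career_domain)

-- ===== LEMMAS AND PROOFS =====

-- first bucket of `bs` whose keywords match the (lowercased) string l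
def fN (bs : List (String × List String)) (l : String) : Option String :=
  (bs.find? (fun b => kwMatch b.2 l)).map Prod.fst

theorem bRoute_eq (l : String) : bRoute l = fN keywordBuckets l := rfl

theorem fN_cons (b : String × List String) (bs : List (String × List String)) (l : String) :
    fN (b :: bs) l = if kwMatch b.2 l then some b.1 else fN bs l := by
  by_cases h : kwMatch b.2 l <;> simp [fN, List.find?, h]

theorem fN_mem {bs : List (String × List String)} {l n : String} (h : fN bs l = some n) :
    n ∈ bs.map Prod.fst := by
  unfold fN at h
  rcases Option.map_eq_some_iff.mp h with ⟨b, hb, rfl⟩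
  exact List.mem_map_of_mem (List.mem_of_find?_eq_some hb)

-- A's inner pass as a structural recursion
def gA (b : String × List String) (seen : PySem.Set String) :
    List String → List String × PySem.Set String
  | [] => ([], seen)
  | s :: ss =>
    if PySem.Str.lower s ∈ seen then gA b seen ss
    else if kwMatch b.2 (PySem.Str.lower s) then
      let r := gA b (PySem.Set.add seen (PySem.Str.lower s)) ss
      (s :: r.1, r.2)
    else gA b seen ss

-- per-skill routing with first-match-wins and the duplicate-lowercase skip
def phi (bs : List (String × List String)) (seen : PySem.Set String) :
    List String → List (String × String)
  | [] => []
  | s :: ss =>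
    if PySem.Str.lower s ∈ seen then phi bs seen ss
    else match fN bs (PySem.Str.lower s) with
      | some n => (s, n) :: phi bs (PySem.Set.add seen (PySem.Str.lower s)) ss
      | none => phi bs seen ss

def proj (n : String) (ps : List (String × String)) : List String :=
  ps.filterMap (fun p => if p.2 = n then some p.1 else none)

theorem proj_filter_ne {m n : String} (h : m ≠ n) (ps : List (String × String)) :
    proj m (ps.filter (fun p => p.2 ≠ n)) = proj m ps := by
  induction ps with
  | nil => rfl
  | cons p ps ih =>
    by_cases hp : p.2 = n
    · simp [proj, List.filter_cons, List.filterMap_cons, hp, Ne.symm h] at ih ⊢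
      exact ih
    · by_cases hm : p.2 = m
      · simp [proj, List.filter_cons, List.filterMap_cons, hp, hm, h] at ih ⊢; exact ih
      · simp [proj, List.filter_cons, List.filterMap_cons, hp, hm] at ih ⊢; exact ih

-- A's inner foldl is gA
theorem foldl_inner_eq_gA (b : String × List String) :
    ∀ (ss : List String) (seen : PySem.Set String) (acc : List String),
    ss.foldl (fun (acc : List String × PySem.Set String) skill =>
      if PySem.Str.lower skill ∈ acc.2 then acc
      else if kwMatch b.2 (PySem.Str.lower skill) then
        (acc.1 ++ [skill], PySem.Set.add acc.2 (PySem.Str.lower skill))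
      else acc) (acc, seen)
    = (acc ++ (gA b seen ss).1, (gA b seen ss).2) := by
  intro ss
  induction ss with
  | nil => intro seen acc; simp [gA]
  | cons s ss ih =>
    intro seen acc
    by_cases h1 : PySem.Str.lower s ∈ seen
    · simp [gA, h1, ih]
    · by_cases h2 : kwMatch b.2 (PySem.Str.lower s)
      · simp [gA, h1, h2, ih]
      · simp [gA, h1, h2, ih]

-- membership in gA's final assigned set
theorem mem_gA_set (b : String × List String) :
    ∀ (ss : List String) (seen : PySem.Set String) (l : String),
    l ∈ (gA b seen ss).2 ↔ l ∈ seen ∨ (kwMatch b.2 l ∧ ∃ s ∈ ss, PySem.Str.lower s = l) := by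
  intro ss
  induction ss with
  | nil => intro seen l; simp [gA]
  | cons s ss ih =>
    intro seen l
    simp only [gA]
    by_cases h1 : PySem.Str.lower s ∈ seen
    · rw [if_pos h1]
      rw [ih]
      constructor
      · rintro (h | ⟨hk, t, ht, hl⟩)
        · exact Or.inl h
        · exact Or.inr ⟨hk, t, List.mem_cons_of_mem _ ht, hl⟩
      · rintro (h | ⟨hk, t, ht, hl⟩)
        · exact Or.inl h
        · rcases List.mem_cons.mp ht with rfl | ht'
          · exact Or.inl (hl ▸ h1)
          · exact Or.inr ⟨hk, t, ht', hl⟩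
    · rw [if_neg h1]
      by_cases h2 : kwMatch b.2 (PySem.Str.lower s)
      · rw [if_pos h2]
        simp only []
        rw [ih]
        constructor
        · rintro (h | ⟨hk, t, ht, hl⟩)
          · rcases (PySem.Set.mem_add seen _ l).mp h with h' | rfl
            · exact Or.inl h'
            · exact Or.inr ⟨h2, s, List.mem_cons_self .., rfl⟩
          · exact Or.inr ⟨hk, t, List.mem_cons_of_mem _ ht, hl⟩
        · rintro (h | ⟨hk, t, ht, hl⟩)
          · exact Or.inl ((PySem.Set.mem_add seen _ l).mpr (Or.inl h))
          · rcases List.mem_cons.mp ht with rfl | ht'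
            · exact Or.inl ((PySem.Set.mem_add seen _ l).mpr (Or.inr hl.symm))
            · exact Or.inr ⟨hk, t, ht', hl⟩
      · rw [if_neg h2]
        rw [ih]
        constructor
        · rintro (h | ⟨hk, t, ht, hl⟩)
          · exact Or.inl h
          · exact Or.inr ⟨hk, t, List.mem_cons_of_mem _ ht, hl⟩
        · rintro (h | ⟨hk, t, ht, hl⟩)
          · exact Or.inl h
          · rcases List.mem_cons.mp ht with rfl | ht'
            · exact absurd (hl ▸ hk) h2
            · exact Or.inr ⟨hk, t, ht', hl⟩

-- (a) the inner pass collects exactly the skills phi routes to bucket b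
theorem gA_eq_proj_phi (b : String × List String) (rest : List (String × List String))
    (hb : b.1 ∉ rest.map Prod.fst) :
    ∀ (ss : List String) (u v : PySem.Set String),
    (∀ l, kwMatch b.2 l → (l ∈ u ↔ l ∈ v)) →
    (gA b u ss).1 = proj b.1 (phi (b :: rest) v ss) := by
  intro ss
  induction ss with
  | nil => intro u v H; simp [gA, phi, proj]
  | cons s ss ih =>
    intro u v H
    by_cases h2 : kwMatch b.2 (PySem.Str.lower s)
    · have huv := H _ h2
      by_cases hv : PySem.Str.lower s ∈ v
      · simp only [gA, phi]
        rw [if_pos (huv.mpr hv), if_pos hv]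
        exact ih u v H
      · have hu : PySem.Str.lower s ∉ u := fun h => hv (huv.mp h)
        simp only [gA, phi]
        rw [if_neg hu, if_pos h2, if_neg hv, fN_cons, if_pos h2]
        simp only [proj, List.filterMap_cons, if_pos rfl]
        refine congrArg (s :: ·) ?_
        refine ih _ _ (fun l hk => ?_)
        rw [PySem.Set.mem_add, PySem.Set.mem_add]
        exact or_congr (H l hk) Iff.rfl
    · have hL : (gA b u (s :: ss)).1 = (gA b u ss).1 := by
        simp only [gA]
        by_cases hu : PySem.Str.lower s ∈ u
        · rw [if_pos hu]
        · rw [if_neg hu, if_neg h2]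
      rw [hL]
      by_cases hv : PySem.Str.lower s ∈ v
      · simp only [phi]; rw [if_pos hv]; exact ih u v H
      · simp only [phi]
        rw [if_neg hv, fN_cons, if_neg h2]
        cases hfn : fN rest (PySem.Str.lower s) with
        | none => exact ih u v H
        | some n =>
          have hn : n ≠ b.1 := fun he => hb (he ▸ fN_mem hfn)
          simp only [proj, List.filterMap_cons, if_neg hn]
          refine ih _ _ (fun l hk => ?_)
          rw [PySem.Set.mem_add]
          constructor
          · exact fun h => Or.inl ((H l hk).mp h)
          · rintro (h | rfl)
            · exact (H l hk).mpr h
            · exact absurd hk h2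
  

-- (b) after the b-pass, routing over the remaining buckets is phi over b :: rest minus b's pairs
theorem phi_rest (b : String × List String) (rest : List (String × List String))
    (hb : b.1 ∉ rest.map Prod.fst) :
    ∀ (ss : List String) (w v : PySem.Set String),
    (∀ s ∈ ss, kwMatch b.2 (PySem.Str.lower s) → PySem.Str.lower s ∈ w) →
    (∀ l, ¬ kwMatch b.2 l → (l ∈ w ↔ l ∈ v)) →
    (∀ l, kwMatch b.2 l → l ∈ v → l ∈ w) →
    phi rest w ss = (phi (b :: rest) v ss).filter (fun p => p.2 ≠ b.1) := by
  intro ss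
  induction ss with
  | nil => intro w v _ _ _; simp [phi]
  | cons s ss ih =>
    intro w v Hocc H1 H2
    have Hocc' : ∀ t ∈ ss, kwMatch b.2 (PySem.Str.lower t) → PySem.Str.lower t ∈ w :=
      fun t ht => Hocc t (List.mem_cons_of_mem _ ht)
    by_cases h2 : kwMatch b.2 (PySem.Str.lower s)
    · have hw : PySem.Str.lower s ∈ w := Hocc s List.mem_cons_self h2
      simp only [phi]
      rw [if_pos hw]
      by_cases hv : PySem.Str.lower s ∈ v
      · rw [if_pos hv]; exact ih w v Hocc' H1 H2
      · rw [if_neg hv, fN_cons, if_pos h2]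
        simp only [List.filter_cons, ne_eq, not_true_eq_false, decide_false,
          Bool.false_eq_true, if_false]
        refine ih w _ Hocc' (fun l hl => ?_) (fun l hl hm => ?_)
        · rw [PySem.Set.mem_add]
          constructor
          · exact fun h => Or.inl ((H1 l hl).mp h)
          · rintro (h | rfl)
            · exact (H1 l hl).mpr h
            · exact absurd h2 hl
        · rcases (PySem.Set.mem_add v _ l).mp hm with h | rfl
          · exact H2 l hl h
          · exact hw
    · have hwv := H1 _ h2
      by_cases hv : PySem.Str.lower s ∈ v
      · simp only [phi]
        rw [if_pos (hwv.mpr hv), if_pos hv]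
        exact ih w v Hocc' H1 H2
      · have hwn : PySem.Str.lower s ∉ w := fun h => hv (hwv.mp h)
        simp only [phi]
        rw [if_neg hwn, if_neg hv, fN_cons, if_neg h2]
        cases hfn : fN rest (PySem.Str.lower s) with
        | none => exact ih w v Hocc' H1 H2
        | some n =>
          have hn : n ≠ b.1 := fun he => hb (he ▸ fN_mem hfn)
          simp only [List.filter_cons, ne_eq, hn, not_false_eq_true, decide_true, if_true]
          refine congrArg ((s, n) :: ·) ?_
          refine ih _ _ (fun t ht hkt => (PySem.Set.mem_add w _ _).mpr (Or.inl (Hocc' t ht hkt)))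
            (fun l hl => ?_) (fun l hl hm => ?_)
          · rw [PySem.Set.mem_add, PySem.Set.mem_add]
            exact or_congr (H1 l hl) Iff.rfl
          · rw [PySem.Set.mem_add]
            rcases (PySem.Set.mem_add v _ l).mp hm with h | rfl
            · exact Or.inl (H2 l hl h)
            · exact Or.inr rfl
  

-- the cluster association list determined by a bucket list, a seen set, and the skills
def clustersOf (bs : List (String × List String)) (seen : PySem.Set String)
    (skills : List String) : List (String × List (String × List String)) :=
  (bs.filter (fun b => proj b.1 (phi bs seen skills) ≠ [])).map
    (fun b => (b.1, [("skills", PySem.List.sorted (proj b.1 (phi bs seen skills)) (fun x => x) false)]))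

-- main interchange: A's bucket-outer fold computes clustersOf, and its assigned set is
-- exactly the lowercases (of occurring skills) that some bucket matches
theorem foldA_eq (skills : List String) :
    ∀ (bs : List (String × List String)), (bs.map Prod.fst).Nodup →
    ∀ (C : PySem.Dict String (List (String × List String))) (seen : PySem.Set String),
    (∀ b ∈ bs, C.contains b.1 = false) →
    (bs.foldl (aStep skills) (C, seen)).1.items = C.items ++ clustersOf bs seen skills ∧
    (∀ l, l ∈ (bs.foldl (aStep skills) (C, seen)).2 ↔
      l ∈ seen ∨ ∃ s ∈ skills, PySem.Str.lower s = l ∧ (fN bs l).isSome) := by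
  intro bs
  induction bs with
  | nil =>
    intro _ C seen _
    exact ⟨by simp [clustersOf], fun l => by simp [fN]⟩
  | cons b bs ih =>
    intro hnd C seen HC
    rw [List.map_cons] at hnd
    have hbn : b.1 ∉ bs.map Prod.fst := (List.nodup_cons.mp hnd).1
    have hnd' : (bs.map Prod.fst).Nodup := (List.nodup_cons.mp hnd).2
    have hmatched : (gA b seen skills).1 = proj b.1 (phi (b :: bs) seen skills) :=
      gA_eq_proj_phi b bs hbn skills seen seen (fun l _ => Iff.rfl)
    have hstep : aStep skills (C, seen) b =
        (if proj b.1 (phi (b :: bs) seen skills) = [] then C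
         else C.insert b.1 [("skills",
           PySem.List.sorted (proj b.1 (phi (b :: bs) seen skills)) (fun x => x) false)],
         (gA b seen skills).2) := by
      simp only [aStep, PySem.Set.contains_iff]
      rw [foldl_inner_eq_gA b skills seen []]
      simp [hmatched]
    simp only [List.foldl_cons, hstep]
    have hphirest : phi bs (gA b seen skills).2 skills =
        (phi (b :: bs) seen skills).filter (fun p => p.2 ≠ b.1) := by
      refine phi_rest b bs hbn skills _ seen
        (fun s hs hk => (mem_gA_set b skills seen _).mpr (Or.inr ⟨hk, s, hs, rfl⟩))
        (fun l hl => ?_) (fun l hk hm => (mem_gA_set b skills seen l).mpr (Or.inl hm))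
      rw [mem_gA_set]
      constructor
      · rintro (h | ⟨hk, _⟩)
        · exact h
        · exact absurd hk hl
      · exact Or.inl
    have hproj : ∀ b' ∈ bs, proj b'.1 (phi bs (gA b seen skills).2 skills) =
        proj b'.1 (phi (b :: bs) seen skills) := by
      intro b' hb'
      rw [hphirest]
      have hne : b'.1 ≠ b.1 := by
        intro he
        exact hbn (by rw [← he]; exact List.mem_map_of_mem hb')
      exact proj_filter_ne hne _
    have hclTail : clustersOf bs (gA b seen skills).2 skills =
        (bs.filter (fun b' => proj b'.1 (phi (b :: bs) seen skills) ≠ [])).map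
          (fun b' => (b'.1, [("skills",
            PySem.List.sorted (proj b'.1 (phi (b :: bs) seen skills)) (fun x => x) false)])) := by
      unfold clustersOf
      rw [List.filter_congr (fun x hx => by rw [hproj x hx])]
      exact List.map_congr_left (fun x hx => by rw [hproj x (List.mem_of_mem_filter hx)])
    have hclCons : clustersOf (b :: bs) seen skills =
        (if proj b.1 (phi (b :: bs) seen skills) = [] then [] else
          [(b.1, [("skills",
            PySem.List.sorted (proj b.1 (phi (b :: bs) seen skills)) (fun x => x) false)])]) ++
        (bs.filter (fun b' => proj b'.1 (phi (b :: bs) seen skills) ≠ [])).map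
          (fun b' => (b'.1, [("skills",
            PySem.List.sorted (proj b'.1 (phi (b :: bs) seen skills)) (fun x => x) false)])) := by
      unfold clustersOf
      rw [List.filter_cons]
      by_cases hnil : proj b.1 (phi (b :: bs) seen skills) = []
      · rw [if_pos hnil, if_neg (by simpa using hnil)]; simp
      · rw [if_neg hnil, if_pos (by simpa using hnil)]; simp
    have memGoal : ∀ l, ((l ∈ seen ∨ (kwMatch b.2 l ∧ ∃ s ∈ skills, PySem.Str.lower s = l)) ∨
        ∃ s ∈ skills, PySem.Str.lower s = l ∧ (fN bs l).isSome) ↔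
        (l ∈ seen ∨ ∃ s ∈ skills, PySem.Str.lower s = l ∧ (fN (b :: bs) l).isSome) := by
      intro l
      constructor
      · rintro ((h | ⟨hk, t, ht, hl⟩) | ⟨t, ht, hl, hs⟩)
        · exact Or.inl h
        · refine Or.inr ⟨t, ht, hl, ?_⟩
          rw [fN_cons, if_pos hk]
          rfl
        · refine Or.inr ⟨t, ht, hl, ?_⟩
          rw [fN_cons]
          by_cases hk : kwMatch b.2 l
          · rw [if_pos hk]; rfl
          · rw [if_neg hk]; exact hs
      · rintro (h | ⟨t, ht, hl, hs⟩)
        · exact Or.inl (Or.inl h)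
        · by_cases hk : kwMatch b.2 l
          · exact Or.inl (Or.inr ⟨hk, t, ht, hl⟩)
          · rw [fN_cons, if_neg hk] at hs
            exact Or.inr ⟨t, ht, hl, hs⟩
    by_cases hnil : proj b.1 (phi (b :: bs) seen skills) = []
    · rw [if_pos hnil]
      obtain ⟨ihI, ihS⟩ := ih hnd' C (gA b seen skills).2 (fun b' hb' => HC b' (List.mem_cons_of_mem _ hb'))
      constructor
      · rw [ihI, hclTail, hclCons, if_pos hnil]; simp
      · intro l
        rw [ihS l, mem_gA_set]
        exact memGoal l
    · rw [if_neg hnil]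
      have HC' : ∀ b' ∈ bs, (C.insert b.1 [("skills",
          PySem.List.sorted (proj b.1 (phi (b :: bs) seen skills)) (fun x => x) false)]).contains b'.1 = false := by
        intro b' hb'
        rw [PySem.Dict.contains_insert]
        have hne : b'.1 ≠ b.1 := fun he => hbn (he ▸ List.mem_map_of_mem hb')
        simp [hne, HC b' (List.mem_cons_of_mem _ hb')]
      obtain ⟨ihI, ihS⟩ := ih hnd' _ (gA b seen skills).2 HC'
      constructor
      · rw [ihI, PySem.Dict.items_insert_of_not_contains _ _ (HC b List.mem_cons_self),
          hclTail, hclCons, if_neg hnil]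
        simp [List.append_assoc]
      · intro l
        rw [ihS l, mem_gA_set]
        exact memGoal l

-- B's single pass: the per-bucket lists and the remaining list
theorem foldB_eq :
    ∀ (skills : List String) (M : PySem.Dict String (List String))
      (seen : PySem.Set String) (rem : List String),
    (∀ l ∈ seen, (fN keywordBuckets l).isSome) →
    (∀ n, (skills.foldl bStep (M, seen, rem)).1.getD n [] =
        M.getD n [] ++ proj n (phi keywordBuckets seen skills)) ∧
    (skills.foldl bStep (M, seen, rem)).2.2 =
        rem ++ skills.filter (fun s => fN keywordBuckets (PySem.Str.lower s) = none) := by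
  intro skills
  induction skills with
  | nil =>
    intro M seen rem _
    exact ⟨fun n => by simp [phi, proj], by simp⟩
  | cons s ss ih =>
    intro M seen rem Hseen
    simp only [List.foldl_cons, bStep]
    by_cases h1 : PySem.Str.lower s ∈ seen
    · rw [if_pos ((PySem.Set.contains_iff _ _).mpr h1)]
      obtain ⟨ihA, ihB⟩ := ih M seen rem Hseen
      have hskip : phi keywordBuckets seen (s :: ss) = phi keywordBuckets seen ss := by
        simp only [phi]; rw [if_pos h1]
      refine ⟨fun n => by rw [hskip]; exact ihA n, ?_⟩
      rw [ihB, List.filter_cons, if_neg ?_]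
      simp only [decide_eq_true_eq]
      exact Option.ne_none_iff_isSome.mpr (Hseen _ h1)
    · rw [if_neg (by simpa [PySem.Set.contains_iff] using h1), bRoute_eq]
      cases hfn : fN keywordBuckets (PySem.Str.lower s) with
      | none =>
        obtain ⟨ihA, ihB⟩ := ih M seen (rem ++ [s]) Hseen
        have hskip : phi keywordBuckets seen (s :: ss) = phi keywordBuckets seen ss := by
          simp only [phi]; rw [if_neg h1, hfn]
        refine ⟨fun n => by rw [hskip]; exact ihA n, ?_⟩
        rw [ihB, List.filter_cons, if_pos (by simp [hfn])]
        simp [List.append_assoc]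
      | some n0 =>
        have Hseen' : ∀ l ∈ PySem.Set.add seen (PySem.Str.lower s),
            (fN keywordBuckets l).isSome = true := by
          intro l hl
          rcases (PySem.Set.mem_add seen _ l).mp hl with h | rfl
          · exact Hseen _ h
          · simp [hfn]
        obtain ⟨ihA, ihB⟩ := ih (M.modify n0 [] (fun xs => xs ++ [s]))
          (PySem.Set.add seen (PySem.Str.lower s)) rem Hseen'
        have hrec : phi keywordBuckets seen (s :: ss) =
            (s, n0) :: phi keywordBuckets (PySem.Set.add seen (PySem.Str.lower s)) ss := by
          simp only [phi]; rw [if_neg h1, hfn]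
        refine ⟨fun n => ?_, ?_⟩
        · rw [hrec, ihA n, PySem.Dict.getD_modify]
          by_cases hn : n = n0
          · subst hn
            simp [proj]
          · simp [proj, hn, Ne.symm hn]
        · rw [ihB, List.filter_cons, if_neg (by simp [hfn])]

-- a guarded fold inserting fresh distinct keys appends the (guard-failing) entries in order
theorem foldl_if_items {V : Type} (g : (String × List String) → V)
    (p : (String × List String) → Prop) [DecidablePred p] :
    ∀ (bs : List (String × List String)), (bs.map Prod.fst).Nodup →
    ∀ (C : PySem.Dict String V), (∀ b ∈ bs, C.contains b.1 = false) →
    (bs.foldl (fun c b => if p b then c else c.insert b.1 (g b)) C).items =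
      C.items ++ (bs.filter (fun b => ¬ p b)).map (fun b => (b.1, g b)) := by
  intro bs
  induction bs with
  | nil => intro _ C _; simp
  | cons b bs ih =>
    intro hnd C HC
    rw [List.map_cons] at hnd
    have hbn : b.1 ∉ bs.map Prod.fst := (List.nodup_cons.mp hnd).1
    have hnd' : (bs.map Prod.fst).Nodup := (List.nodup_cons.mp hnd).2
    simp only [List.foldl_cons]
    by_cases hp : p b
    · rw [if_pos hp, ih hnd' C (fun b' hb' => HC b' (List.mem_cons_of_mem _ hb'))]
      rw [List.filter_cons, if_neg (by simpa using hp)]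
    · rw [if_neg hp]
      have HC' : ∀ b' ∈ bs, (C.insert b.1 (g b)).contains b'.1 = false := by
        intro b' hb'
        rw [PySem.Dict.contains_insert]
        have hne : b'.1 ≠ b.1 := fun he => hbn (he ▸ List.mem_map_of_mem hb')
        simp [hne, HC b' (List.mem_cons_of_mem _ hb')]
      rw [ih hnd' _ HC',
        PySem.Dict.items_insert_of_not_contains _ _ (HC b List.mem_cons_self),
        List.filter_cons, if_pos (by simpa using hp)]
      simp [List.append_assoc]

theorem initGetD :
    ∀ (bs : List (String × List String)) (d : PySem.Dict String (List String)),
    (∀ n, d.getD n [] = []) → ∀ n,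
    (bs.foldl (fun (d : PySem.Dict String (List String)) b => d.insert b.1 ([] : List String)) d).getD n [] = [] := by
  intro bs
  induction bs with
  | nil => intro d h n; exact h n
  | cons b bs ih =>
    intro d h n
    refine ih _ (fun m => ?_) n
    rw [PySem.Dict.getD_insert]
    by_cases hm : m = b.1 <;> simp [hm, h m]

theorem contOther {V : Type} (d : PySem.Dict String V)
    (h : ∀ k ∈ d.items.map Prod.fst, k ∈ keywordBuckets.map Prod.fst) :
    d.contains "Other Skills" = false := by
  cases hc : d.contains "Other Skills"
  · rfl
  · exfalso
    have hk : "Other Skills" ∈ d.keys := (PySem.Dict.contains_iff_mem_keys d _).mp hc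
    have : "Other Skills" ∈ keywordBuckets.map Prod.fst := h _ hk
    revert this
    decide

theorem clustersOf_fst (seen : PySem.Set String) (skills : List String) :
    ∀ k ∈ (clustersOf keywordBuckets seen skills).map Prod.fst, k ∈ keywordBuckets.map Prod.fst := by
  intro k hk
  unfold clustersOf at hk
  rw [List.map_map] at hk
  rcases List.mem_map.mp hk with ⟨b, hb, rfl⟩
  exact List.mem_map_of_mem (List.mem_of_mem_filter hb)

-- ===== VERDICT (by name: the statement is the Claim_ definition above) =====
theorem fallback_dynamic_clusters_py_spec : Claim_equal_fallback_dynamic_clusters_py := by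
  intro all_skills career_domain _
  unfold Spec_fallback_dynamic_clusters_py
  unfold fallback_dynamic_clusters_py fallback_dynamic_clusters_py_alt
  simp only []
  have hnd : (keywordBuckets.map Prod.fst).Nodup := by decide
  obtain ⟨hAitems, hAset⟩ := foldA_eq all_skills keywordBuckets hnd
    PySem.Dict.empty PySem.Set.empty (fun b _ => PySem.Dict.contains_empty _)
  set stA := keywordBuckets.foldl (aStep all_skills) (PySem.Dict.empty, PySem.Set.empty) with hstA
  set init := keywordBuckets.foldl
    (fun (d : PySem.Dict String (List String)) b => d.insert b.1 ([] : List String))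
    PySem.Dict.empty with hinitdef
  have hinit : ∀ n, init.getD n [] = [] :=
    initGetD keywordBuckets PySem.Dict.empty (fun n => PySem.Dict.getD_empty _ _)
  obtain ⟨hBget, hBrem⟩ := foldB_eq all_skills init PySem.Set.empty []
    (fun l hl => absurd hl (List.not_mem_nil))
  set stB := all_skills.foldl bStep (init, PySem.Set.empty, []) with hstB
  have hget : ∀ n, stB.1.getD n [] = proj n (phi keywordBuckets PySem.Set.empty all_skills) := by
    intro n
    rw [hBget n, hinit n, List.nil_append]
  -- the remaining lists agree
  have hremA : all_skills.filter (fun s => !(PySem.Set.contains stA.2 (PySem.Str.lower s))) =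
      all_skills.filter (fun s => fN keywordBuckets (PySem.Str.lower s) = none) := by
    apply List.filter_congr
    intro s hs
    have hchar := hAset (PySem.Str.lower s)
    by_cases hfn : fN keywordBuckets (PySem.Str.lower s) = none
    · have hnm : PySem.Str.lower s ∉ stA.2 := by
        rw [hchar]
        rintro (h | ⟨t, ht, hl, hsome⟩)
        · exact absurd h (List.not_mem_nil)
        · rw [hfn] at hsome; exact absurd hsome (by simp)
      simp [hnm, hfn]
    · have hm : PySem.Str.lower s ∈ stA.2 :=
        hchar.mpr (Or.inr ⟨s, hs, rfl, Option.ne_none_iff_isSome.mp hfn⟩)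
      simp [hm, hfn]
  rw [List.nil_append] at hBrem
  -- the cluster dicts (before "Other Skills") have the same items
  have hAit : stA.1.items = clustersOf keywordBuckets PySem.Set.empty all_skills := by
    rw [hAitems]; rfl
  have hBbase : (keywordBuckets.foldl
      (fun (c : PySem.Dict String (List (String × List String))) b =>
        if stB.1.getD b.1 [] = [] then c
        else c.insert b.1 [("skills", PySem.List.sorted (stB.1.getD b.1 []) (fun x => x) false)])
      PySem.Dict.empty).items = clustersOf keywordBuckets PySem.Set.empty all_skills := by
    rw [foldl_if_items (fun b => [("skills", PySem.List.sorted (stB.1.getD b.1 []) (fun x => x) false)])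
      (fun b => stB.1.getD b.1 [] = []) keywordBuckets hnd PySem.Dict.empty
      (fun b _ => PySem.Dict.contains_empty _)]
    unfold clustersOf
    rw [List.filter_congr (fun x _ => by rw [hget x.1])]
    refine congrArg (List.append _) ?_
    exact List.map_congr_left (fun x _ => by rw [hget x.1])
  -- final: case on the (equal) remaining lists
  rw [hremA, hBrem]
  set R := all_skills.filter (fun s => fN keywordBuckets (PySem.Str.lower s) = none) with hR
  have hcontA : stA.1.contains "Other Skills" = false :=
    contOther _ (by rw [hAit]; exact clustersOf_fst _ _)
  by_cases hRnil : R = []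
  · rw [if_pos hRnil, if_pos hRnil]
    refine congrArg (fun x => [("clusters", x)]) ?_
    rw [hAit, hBbase]
  · rw [if_neg hRnil, if_neg hRnil]
    refine congrArg (fun x => [("clusters", x)]) ?_
    rw [PySem.Dict.items_insert_of_not_contains _ _ hcontA,
      PySem.Dict.items_insert_of_not_contains _ _
        (contOther _ (by rw [hBbase]; exact clustersOf_fst _ _)),
      hAit, hBbase]
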